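-- pv_equiv track=rewrite | github.com/hxwvaa/codingame_winter | codingame_winter/z2.py | is_tentacle_next_to_coordinate
-- ===== SOURCE A (Python) =====
-- def is_tentacle_next_to_coordinate(target_x, target_y, enemy_organs):
--
--     # Define direction offsets
--     direction_offsets = {
--         "N": (0, -1),
--         "S": (0, 1),
--         "E": (1, 0),
--         "W": (-1, 0)
--     }
--
--     # Check all enemy organs
--     for ex, ey, organ_dir in enemy_organs:
--         if organ_dir in direction_offsets:
--             dx, dy = direction_offsets[organ_dir]
--             # Get the position the tentacle is facing
--             facing_x, facing_y = ex + dx, ey + dy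
--
--             # Check if the tentacle is facing the target coordinate
--             if facing_x == target_x and facing_y == target_y:
--                 return True
--
--     return False
-- ===== SOURCE B (Python) =====
-- def is_tentacle_next_to_coordinate(target_x, target_y, enemy_organs):
--     # Index-first: build a set of organ triples once, then probe the four
--     # source cells that would face the target.
--     organ_set = {tuple(o) for o in enemy_organs}
--     for d, dx, dy in (("N", 0, -1), ("S", 0, 1), ("E", 1, 0), ("W", -1, 0)):
--         if (target_x - dx, target_y - dy, d) in organ_set:
--             return True
--     return False
-- ===== Notes on version B (the rewrite author's own statement) =====
-- stated objective: alternative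
-- what changed: Instead of scanning every organ and computing the cell each tentacle faces, B builds a set of the organ triples once and probes the four candidate source cells (target - offset, direction) with O(1) set lookups.
import Mathlib
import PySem

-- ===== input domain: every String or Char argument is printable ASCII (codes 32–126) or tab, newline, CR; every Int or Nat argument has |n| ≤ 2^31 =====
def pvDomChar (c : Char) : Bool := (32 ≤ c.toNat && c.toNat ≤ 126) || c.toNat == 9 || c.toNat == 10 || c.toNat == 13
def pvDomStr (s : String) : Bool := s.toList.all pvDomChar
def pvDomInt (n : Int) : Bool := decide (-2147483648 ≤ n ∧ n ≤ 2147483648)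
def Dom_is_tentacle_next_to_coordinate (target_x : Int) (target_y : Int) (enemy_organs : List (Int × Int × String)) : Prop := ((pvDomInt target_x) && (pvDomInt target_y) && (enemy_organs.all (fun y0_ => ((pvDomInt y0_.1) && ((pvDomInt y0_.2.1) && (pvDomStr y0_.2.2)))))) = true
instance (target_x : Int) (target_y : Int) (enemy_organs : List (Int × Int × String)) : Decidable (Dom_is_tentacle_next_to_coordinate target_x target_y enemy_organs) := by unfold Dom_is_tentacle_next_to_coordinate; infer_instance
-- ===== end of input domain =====

-- B replaces A's scan over all organs by a set of organ triples probed at the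
-- four candidate source cells; alternative decomposition, same exact result.

-- ===== PORT A =====
-- the literal dict "direction_offsets": membership test + lookup, keys in source order
def pvOffset? (d : String) : Option (Int × Int) :=
  if d = "N" then some (0, -1)
  else if d = "S" then some (0, 1)
  else if d = "E" then some (1, 0)
  else if d = "W" then some (-1, 0)
  else none

-- the 'for ex, ey, organ_dir in enemy_organs' loop with its early return
def pvLoopA (target_x target_y : Int) : List (Int × Int × String) → Bool
  | [] => false
  | (ex, ey, organ_dir) :: rest =>
    match pvOffset? organ_dir with
    | some (dx, dy) =>
      if ex + dx = target_x ∧ ey + dy = target_y then true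
      else pvLoopA target_x target_y rest
    | none => pvLoopA target_x target_y rest

def is_tentacle_next_to_coordinate (target_x : Int) (target_y : Int) (enemy_organs : List (Int × Int × String)) : Bool :=
  pvLoopA target_x target_y enemy_organs

-- ===== PORT B =====
def is_tentacle_next_to_coordinate_alt (target_x : Int) (target_y : Int) (enemy_organs : List (Int × Int × String)) : Bool :=
  let organ_set : PySem.Set (Int × Int × String) := PySem.Set.ofList enemy_organs
  [("N", (0 : Int), (-1 : Int)), ("S", 0, 1), ("E", 1, 0), ("W", -1, 0)].any
    (fun t => PySem.Set.contains organ_set (target_x - t.2.1, target_y - t.2.2, t.1))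

-- ===== PRECONDITION & SPEC =====
def Spec_is_tentacle_next_to_coordinate (target_x : Int) (target_y : Int) (enemy_organs : List (Int × Int × String)) (out : Bool) : Prop := out = is_tentacle_next_to_coordinate_alt target_x target_y enemy_organs
instance (target_x : Int) (target_y : Int) (enemy_organs : List (Int × Int × String)) (out : Bool) : Decidable (Spec_is_tentacle_next_to_coordinate target_x target_y enemy_organs out) := by unfold Spec_is_tentacle_next_to_coordinate; infer_instance

-- ===== CLAIM (what is proved, stated in full; the proofs are below) =====
def Claim_equal_is_tentacle_next_to_coordinate : Prop := ∀ (target_x : Int) (target_y : Int) (enemy_organs : List (Int × Int × String)), Dom_is_tentacle_next_to_coordinate target_x target_y enemy_organs → Spec_is_tentacle_next_to_coordinate target_x target_y enemy_organs (is_tentacle_next_to_coordinate target_x target_y enemy_organs)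

-- ===== LEMMAS AND PROOFS =====

-- A's loop succeeds iff some organ faces the target
theorem pvLoopA_eq_true_iff (tx ty : Int) (organs : List (Int × Int × String)) :
    pvLoopA tx ty organs = true ↔
      ∃ o ∈ organs, ∃ dx dy, pvOffset? o.2.2 = some (dx, dy) ∧ o.1 + dx = tx ∧ o.2.1 + dy = ty := by
  induction organs with
  | nil => simp [pvLoopA]
  | cons o rest ih =>
    obtain ⟨ex, ey, d⟩ := o
    simp only [pvLoopA]
    cases h : pvOffset? d with
    | none =>
      simp only [ih, List.mem_cons]
      constructor
      · rintro ⟨o, ho, hrest⟩; exact ⟨o, Or.inr ho, hrest⟩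
      · rintro ⟨o, (rfl | ho), dx, dy, hoff, hc⟩
        · simp [h] at hoff
        · exact ⟨o, ho, dx, dy, hoff, hc⟩
    | some p =>
      obtain ⟨dx, dy⟩ := p
      by_cases hc : ex + dx = tx ∧ ey + dy = ty
      · simp only [if_pos hc, true_iff]
        exact ⟨(ex, ey, d), List.mem_cons_self, dx, dy, h, hc.1, hc.2⟩
      · simp only [if_neg hc, ih, List.mem_cons]
        constructor
        · rintro ⟨o, ho, hrest⟩; exact ⟨o, Or.inr ho, hrest⟩
        · rintro ⟨o, (rfl | ho), dx', dy', hoff, hc'⟩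
          · rw [h] at hoff
            exact absurd ⟨by injection hoff with h1; injection h1 with h2 h3; rw [h2]; exact hc'.1,
              by injection hoff with h1; injection h1 with h2 h3; rw [h3]; exact hc'.2⟩ hc
          · exact ⟨o, ho, dx', dy', hoff, hc'⟩

-- B succeeds iff one of the four candidate source triples is among the organs
theorem altB_eq_true_iff (tx ty : Int) (organs : List (Int × Int × String)) :
    is_tentacle_next_to_coordinate_alt tx ty organs = true ↔
      (tx, ty + 1, "N") ∈ organs ∨ (tx, ty - 1, "S") ∈ organs ∨
      (tx - 1, ty, "E") ∈ organs ∨ (tx + 1, ty, "W") ∈ organs := by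
  simp only [is_tentacle_next_to_coordinate_alt, List.any_cons, List.any_nil,
    Bool.or_eq_true, Bool.false_eq_true, or_false, PySem.Set.contains_iff, PySem.Set.mem_ofList]
  norm_num [sub_neg_eq_add, sub_eq_add_neg]

theorem pv_main (tx ty : Int) (organs : List (Int × Int × String)) :
    is_tentacle_next_to_coordinate tx ty organs = is_tentacle_next_to_coordinate_alt tx ty organs := by
  rw [Bool.eq_iff_iff]
  rw [show is_tentacle_next_to_coordinate tx ty organs = pvLoopA tx ty organs from rfl]
  rw [pvLoopA_eq_true_iff, altB_eq_true_iff]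
  constructor
  · rintro ⟨⟨ex, ey, d⟩, ho, dx, dy, hoff, h1, h2⟩
    simp only [pvOffset?] at hoff
    split_ifs at hoff with hN hS hE hW
    · subst hN
      obtain ⟨rfl, rfl⟩ : (0 : Int) = dx ∧ (-1 : Int) = dy := by
        simpa [Prod.ext_iff] using hoff
      refine Or.inl ?_
      have he : (tx, ty + 1, ("N" : String)) = (ex, ey, "N") := by
        simp only [Prod.ext_iff]; norm_num at h1 h2 ⊢; omega
      exact he ▸ ho
    · subst hS
      obtain ⟨rfl, rfl⟩ : (0 : Int) = dx ∧ (1 : Int) = dy := by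
        simpa [Prod.ext_iff] using hoff
      refine Or.inr (Or.inl ?_)
      have he : (tx, ty - 1, ("S" : String)) = (ex, ey, "S") := by
        simp only [Prod.ext_iff]; norm_num at h1 h2 ⊢; omega
      exact he ▸ ho
    · subst hE
      obtain ⟨rfl, rfl⟩ : (1 : Int) = dx ∧ (0 : Int) = dy := by
        simpa [Prod.ext_iff] using hoff
      refine Or.inr (Or.inr (Or.inl ?_))
      have he : (tx - 1, ty, ("E" : String)) = (ex, ey, "E") := by
        simp only [Prod.ext_iff]; norm_num at h1 h2 ⊢; omega
      exact he ▸ ho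
    · subst hW
      obtain ⟨rfl, rfl⟩ : (-1 : Int) = dx ∧ (0 : Int) = dy := by
        simpa [Prod.ext_iff] using hoff
      refine Or.inr (Or.inr (Or.inr ?_))
      have he : (tx + 1, ty, ("W" : String)) = (ex, ey, "W") := by
        simp only [Prod.ext_iff]; norm_num at h1 h2 ⊢; omega
      exact he ▸ ho
  · rintro (h | h | h | h)
    · exact ⟨(tx, ty + 1, "N"), h, 0, -1, by simp [pvOffset?], by norm_num, by norm_num⟩
    · exact ⟨(tx, ty - 1, "S"), h, 0, 1, by simp [pvOffset?], by norm_num, by norm_num⟩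
    · exact ⟨(tx - 1, ty, "E"), h, 1, 0, by simp [pvOffset?], by norm_num, by norm_num⟩
    · exact ⟨(tx + 1, ty, "W"), h, -1, 0, by simp [pvOffset?], by norm_num, by norm_num⟩

-- ===== VERDICT (by name: the statement is the Claim_ definition above) =====
theorem is_tentacle_next_to_coordinate_spec : Claim_equal_is_tentacle_next_to_coordinate := by
  intro tx ty organs _
  exact pv_main tx ty organs
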